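-- pv_equiv track=rewrite | github.com/aitaddihamza/aoc-2025 | 2025/day04/main.py | get_positions_and_sum
-- ===== SOURCE A (Python) =====
-- def get_positions_and_sum(content):
--     positions = set()
--     s = 0
--     for i in range(len(content)):
--         for j in range(len(content[i])):
--             if content[i][j] == '@':
--                 total_neighbors = 0
--                 for k in range(-1, 2):
--                     for z in range(-1, 2):
--                         if i + k < 0 or i +k >= len(content):
--                             break
--                         if i + k >= 0 and i + k < len(content) \
--                                 and j + z >= 0 and j + z < len(content[i]):
--                             if content[i+k][j+z] == '@':
--                                 total_neighbors += 1
--                 if total_neighbors <= 4 and total_neighbors > 0: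
--                     s += 1
--                     positions.add((i, j))
--     return (positions, s)
-- ===== SOURCE B (Python) =====
-- def get_positions_and_sum(content):
--     # Pass 1: per-row prefix sums of '@' counts (P[r][c] = number of '@' in content[r][:c]).
--     P = []
--     for row in content:
--         acc = [0]
--         t = 0
--         for ch in row:
--             if ch == '@':
--                 t += 1
--             acc.append(t)
--         P.append(acc)
--     # Pass 2: each cell's 3x3 window total is a difference of prefix sums per row,
--     # columns clipped to the cell's own row width (that is the window A counts).
--     positions = set()
--     s = 0
--     n = len(content)
--     for i in range(n):
--         W = len(content[i])
--         for j in range(W):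
--             if content[i][j] == '@':
--                 lo = max(j - 1, 0)
--                 hi = min(j + 2, W)
--                 total = sum(P[r][hi] - P[r][lo] for r in range(max(i - 1, 0), min(i + 2, n)))
--                 if 1 <= total <= 4:
--                     positions.add((i, j))
--                     s += 1
--     return (positions, s)
-- ===== Notes on version B (the rewrite author's own statement) =====
-- stated objective: alternative
-- what changed: A gathers each '@' cell's neighbor count with a bounds-checked 3x3 index scan (with a break); B first builds per-row prefix-sum tables of '@' counts and then computes each cell's window total as a difference of two prefix sums per adjacent row, so the inner 3x3 scan disappears.
import Mathlib
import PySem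

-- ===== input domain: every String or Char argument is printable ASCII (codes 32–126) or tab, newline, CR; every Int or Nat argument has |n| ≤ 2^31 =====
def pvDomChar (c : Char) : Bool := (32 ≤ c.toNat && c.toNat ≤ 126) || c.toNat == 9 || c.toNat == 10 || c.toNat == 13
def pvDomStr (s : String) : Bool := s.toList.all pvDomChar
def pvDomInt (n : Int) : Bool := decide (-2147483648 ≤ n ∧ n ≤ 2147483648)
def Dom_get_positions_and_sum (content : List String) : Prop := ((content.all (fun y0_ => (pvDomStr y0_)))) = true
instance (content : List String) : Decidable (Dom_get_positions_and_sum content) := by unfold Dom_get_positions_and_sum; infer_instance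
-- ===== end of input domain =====

-- B replaces A's bounds-checked 3x3 neighbour scan per '@' cell by two staged passes:
-- per-row prefix-sum tables of '@' counts built once, then each cell's window total read
-- as a difference of two prefix sums per adjacent row (objective: alternative). Equal
-- return value wherever A returns; A raises IndexError on some ragged grids (those
-- inputs are excluded by Pre_).

-- ===== PORT A =====
-- the inner 'for z in range(-1, 2)' loop, which can 'break'
def pvInnerZ_A (content : List String) (n i j k : Int) : List Int → Int → Int
  | [], tn => tn
  | z :: rest, tn =>
    if i + k < 0 ∨ i + k ≥ n then tn   -- 'break'
    else
      pvInnerZ_A content n i j k rest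
        (if i + k ≥ 0 ∧ i + k < n ∧ j + z ≥ 0 ∧
            j + z < PySem.Str.len (PySem.List.pyGetD content i "") then
          (if PySem.Str.pyGet? (PySem.List.pyGetD content (i + k) "") (j + z) = some '@' then
            tn + 1 else tn)
        else tn)

-- total_neighbors of cell (i, j)
def pvTn_A (content : List String) (n i j : Int) : Int :=
  (PySem.List.pyRange (-1) 2 1).foldl (fun tn k =>
    pvInnerZ_A content n i j k (PySem.List.pyRange (-1) 2 1) tn) 0

def get_positions_and_sum (content : List String) : (List (Int × Int)) × Int :=
  let n : Int := content.length
  (PySem.List.pyRange 0 n 1).foldl (fun acc i =>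
    (PySem.List.pyRange 0 (PySem.Str.len (PySem.List.pyGetD content i "")) 1).foldl (fun acc j =>
      if PySem.Str.pyGet? (PySem.List.pyGetD content i "") j = some '@' then
        (if pvTn_A content n i j ≤ 4 ∧ pvTn_A content n i j > 0 then
          (PySem.Set.add acc.1 (i, j), acc.2 + 1) else acc)
      else acc) acc) (([] : List (Int × Int)), (0 : Int))

-- ===== PORT B =====
-- pass 1 of Source B: 'acc=[0]; t=0; for ch in row: if ch=='@': t+=1; acc.append(t)'
def pvPrefixRow (row : List Char) : List Int :=
  (row.foldl (fun (p : List Int × Int) ch =>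
    (p.1 ++ [if ch = '@' then p.2 + 1 else p.2], if ch = '@' then p.2 + 1 else p.2))
    ([0], 0)).1

-- 'P = []; for row in content: … P.append(acc)'
def pvP (content : List String) : List (List Int) :=
  content.map (fun row => pvPrefixRow row.toList)

-- 'total = sum(P[r][hi] - P[r][lo] for r in range(max(i-1,0), min(i+2,n)))'
def pvTotal_B (content : List String) (i j : Int) : Int :=
  (PySem.List.pyRange (max (i - 1) 0) (min (i + 2) (content.length : Int)) 1).foldl
    (fun t r => t +
      (PySem.List.pyGetD (PySem.List.pyGetD (pvP content) r [])
          (min (j + 2) (PySem.Str.len (PySem.List.pyGetD content i ""))) 0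
       - PySem.List.pyGetD (PySem.List.pyGetD (pvP content) r []) (max (j - 1) 0) 0)) 0

def get_positions_and_sum_alt (content : List String) : (List (Int × Int)) × Int :=
  let n : Int := content.length
  (PySem.List.pyRange 0 n 1).foldl (fun acc i =>
    (PySem.List.pyRange 0 (PySem.Str.len (PySem.List.pyGetD content i "")) 1).foldl (fun acc j =>
      if PySem.Str.pyGet? (PySem.List.pyGetD content i "") j = some '@' then
        (if 1 ≤ pvTotal_B content i j ∧ pvTotal_B content i j ≤ 4 then
          (PySem.Set.add acc.1 (i, j), acc.2 + 1) else acc)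
      else acc) acc) (([] : List (Int × Int)), (0 : Int))

-- ===== PRECONDITION & SPEC =====
-- the Bool check behind Pre_: every '@' cell's 3×3 window, clipped to its own row's
-- width, stays inside every neighbouring row it touches
def pvPreB (content : List String) : Bool :=
  (List.range content.length).all fun i =>
    (List.range ((content.map String.toList).getD i []).length).all fun j =>
      (((content.map String.toList).getD i []).getD j ' ' != '@') ||
      (([-1, 0, 1] : List Int).all fun k =>
        ([-1, 0, 1] : List Int).all fun z =>
          !(decide (0 ≤ (i : Int) + k) && decide ((i : Int) + k < (content.length : Int)) &&
            decide (0 ≤ (j : Int) + z) &&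
            decide ((j : Int) + z < (((content.map String.toList).getD i []).length : Int))) ||
          decide ((j : Int) + z < (((content.map String.toList).getD ((i : Int) + k).toNat []).length : Int)))

-- Pre_ excludes exactly the ragged grids on which A raises IndexError: some '@' cell's
-- 3×3 window, clipped to its own row's width, reaches past a shorter neighbouring row.
def Pre_get_positions_and_sum (content : List String) : Prop := pvPreB content = true
instance (content : List String) : Decidable (Pre_get_positions_and_sum content) := by
  unfold Pre_get_positions_and_sum; infer_instance

def pvWitness_get_positions_and_sum : List String := ["@.@", ".@.", "@@@"]

def Spec_get_positions_and_sum (content : List String) (out : (List (Int × Int)) × Int) : Prop := out = get_positions_and_sum_alt content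
instance (content : List String) (out : (List (Int × Int)) × Int) : Decidable (Spec_get_positions_and_sum content out) := by unfold Spec_get_positions_and_sum; infer_instance

-- ===== CLAIM (what is proved, stated in full; the proofs are below) =====
def Claim_equal_get_positions_and_sum : Prop := ∀ (content : List String), Dom_get_positions_and_sum content → Pre_get_positions_and_sum content → Spec_get_positions_and_sum content (get_positions_and_sum content)

-- ===== LEMMAS AND PROOFS =====

-- the character grid behind the strings
def pvG (content : List String) : List (List Char) := content.map String.toList

-- the '@' cells of row i, then of the whole grid, in scan order
def pvCellsRow (g : List (List Char)) (i : Nat) : List (Int × Int) :=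
  (List.range (g.getD i []).length).filterMap fun j =>
    if (g.getD i []).getD j ' ' = '@' then some ((i : Int), (j : Int)) else none
def pvCells (g : List (List Char)) : List (Int × Int) :=
  (List.range g.length).flatMap (pvCellsRow g)

lemma pv_g_getD (content : List String) (i : Nat) :
    (content.map String.toList).getD i [] = (content.getD i "").toList := by
  simp only [List.getD_eq_getElem?_getD, List.getElem?_map]
  cases content[i]? <;> simp

-- Pre_ in quantifier form
def pvPreP (content : List String) : Prop :=
  ∀ i < content.length, ∀ j < ((pvG content).getD i []).length,
    ((pvG content).getD i []).getD j ' ' = '@' →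
      ∀ k ∈ ([-1, 0, 1] : List Int), ∀ z ∈ ([-1, 0, 1] : List Int),
        0 ≤ (i : Int) + k → (i : Int) + k < (content.length : Int) →
        0 ≤ (j : Int) + z → (j : Int) + z < (((pvG content).getD i []).length : Int) →
        (j : Int) + z < (((pvG content).getD ((i : Int) + k).toNat []).length : Int)

lemma pv_pre_iff (content : List String) :
    Pre_get_positions_and_sum content ↔ pvPreP content := by
  unfold Pre_get_positions_and_sum pvPreB pvPreP pvG
  simp only [List.all_eq_true, List.mem_range, Bool.or_eq_true, bne_iff_ne, ne_eq,
    Bool.not_eq_eq_eq_not, Bool.not_true, decide_eq_true_eq,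
    Bool.and_eq_false_iff, decide_eq_false_iff_not]
  constructor
  · intro h i hi j hj hch k hk z hz h1 h2 h3 h4
    rcases h i hi j hj with hne | hrest
    · exact absurd hch hne
    · rcases hrest k hk z hz with hfail | hok
      · tauto
      · exact hok
  · intro h i hi j hj
    by_cases hch : ((content.map String.toList).getD i []).getD j ' ' = '@'
    · refine Or.inr fun k hk z hz => ?_
      by_cases hc1 : 0 ≤ (i : Int) + k
      · by_cases hc2 : (i : Int) + k < (content.length : Int)
        · by_cases hc3 : 0 ≤ (j : Int) + z
          · by_cases hc4 : (j : Int) + z < (((content.map String.toList).getD i []).length : Int)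
            · exact Or.inr (h i hi j hj hch k hk z hz hc1 hc2 hc3 hc4)
            · exact Or.inl (by tauto)
          · exact Or.inl (by tauto)
        · exact Or.inl (by tauto)
      · exact Or.inl (by tauto)
    · exact Or.inl hch

lemma pv_W_eq (content : List String) (i : Int) (h0 : 0 ≤ i)
    (_h1 : i < (content.length : Int)) :
    PySem.Str.len (PySem.List.pyGetD content i "")
      = (((pvG content).getD i.toNat []).length : Int) := by
  rw [← Int.toNat_of_nonneg h0]
  simp only [PySem.List.pyGetD_natCast, Int.toNat_natCast]
  rw [pvG, pv_g_getD]
  simp [PySem.Str.len_eq]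

lemma pv_lookup_iff (content : List String) (a b : Int) (ha0 : 0 ≤ a) (hb0 : 0 ≤ b) :
    (PySem.Str.pyGet? (PySem.List.pyGetD content a "") b = some '@') ↔
      b < (((pvG content).getD a.toNat []).length : Int) ∧
      ((pvG content).getD a.toNat []).getD b.toNat ' ' = '@' := by
  rw [← Int.toNat_of_nonneg ha0, ← Int.toNat_of_nonneg hb0]
  simp only [PySem.List.pyGetD_natCast, Int.toNat_natCast, PySem.Str.pyGet?_natCast]
  rw [pvG, pv_g_getD]
  set L := (content.getD a.toNat "").toList with hL
  constructor
  · intro h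
    have hlt : b.toNat < L.length := by
      by_contra hge
      rw [List.getElem?_eq_none (by omega)] at h
      exact absurd h (by simp)
    rw [List.getElem?_eq_getElem hlt] at h
    refine ⟨by exact_mod_cast hlt, ?_⟩
    rw [List.getD_eq_getElem?_getD, List.getElem?_eq_getElem hlt]
    simpa using h
  · rintro ⟨hlt, hch⟩
    have hlt' : b.toNat < L.length := by exact_mod_cast hlt
    rw [List.getElem?_eq_getElem hlt']
    rw [List.getD_eq_getElem?_getD, List.getElem?_eq_getElem hlt'] at hch
    simpa using hch

lemma pv_innerZ_eval (content : List String) (n i j k : Int) (zs : List Int) (tn : Int) :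
    pvInnerZ_A content n i j k zs tn =
      if i + k < 0 ∨ i + k ≥ n then tn
      else tn + (zs.countP fun z =>
        decide ((i + k ≥ 0 ∧ i + k < n ∧ j + z ≥ 0 ∧
          j + z < PySem.Str.len (PySem.List.pyGetD content i "")) ∧
          PySem.Str.pyGet? (PySem.List.pyGetD content (i + k) "") (j + z) = some '@')) := by
  induction zs generalizing tn with
  | nil => unfold pvInnerZ_A; split <;> simp
  | cons z rest ih =>
    unfold pvInnerZ_A
    by_cases hbad : i + k < 0 ∨ i + k ≥ n
    · simp [hbad]
    · rw [if_neg hbad, ih, if_neg hbad, List.countP_cons]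
      by_cases h : (i + k ≥ 0 ∧ i + k < n ∧ j + z ≥ 0 ∧
          j + z < PySem.Str.len (PySem.List.pyGetD content i "")) ∧
          PySem.Str.pyGet? (PySem.List.pyGetD content (i + k) "") (j + z) = some '@'
      · rw [if_pos h.1, if_pos h.2, decide_eq_true h, if_pos (rfl : true = true)]
        push_cast
        omega
      · rw [decide_eq_false h]
        by_cases hq : i + k ≥ 0 ∧ i + k < n ∧ j + z ≥ 0 ∧
            j + z < PySem.Str.len (PySem.List.pyGetD content i "")
        · rw [if_pos hq, if_neg (fun hc => h ⟨hq, hc⟩), if_neg Bool.false_ne_true,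
            Nat.add_zero, if_neg hbad]
        · rw [if_neg hq, if_neg Bool.false_ne_true, Nat.add_zero, if_neg hbad]

lemma pv_tn_eval (content : List String) (n i j : Int) :
    pvTn_A content n i j =
      (if i + -1 < 0 ∨ i + -1 ≥ n then 0 else ((([-1, 0, 1] : List Int).countP fun z =>
        decide ((i + -1 ≥ 0 ∧ i + -1 < n ∧ j + z ≥ 0 ∧
          j + z < PySem.Str.len (PySem.List.pyGetD content i "")) ∧
          PySem.Str.pyGet? (PySem.List.pyGetD content (i + -1) "") (j + z) = some '@')) : Int)) +
      (if i + 0 < 0 ∨ i + 0 ≥ n then 0 else ((([-1, 0, 1] : List Int).countP fun z =>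
        decide ((i + 0 ≥ 0 ∧ i + 0 < n ∧ j + z ≥ 0 ∧
          j + z < PySem.Str.len (PySem.List.pyGetD content i "")) ∧
          PySem.Str.pyGet? (PySem.List.pyGetD content (i + 0) "") (j + z) = some '@')) : Int)) +
      (if i + 1 < 0 ∨ i + 1 ≥ n then 0 else ((([-1, 0, 1] : List Int).countP fun z =>
        decide ((i + 1 ≥ 0 ∧ i + 1 < n ∧ j + z ≥ 0 ∧
          j + z < PySem.Str.len (PySem.List.pyGetD content i "")) ∧
          PySem.Str.pyGet? (PySem.List.pyGetD content (i + 1) "") (j + z) = some '@')) : Int)) := by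
  unfold pvTn_A
  rw [show PySem.List.pyRange (-1) 2 1 = ([-1, 0, 1] : List Int) from rfl]
  simp only [List.foldl_cons, List.foldl_nil]
  rw [pv_innerZ_eval, pv_innerZ_eval, pv_innerZ_eval]
  split_ifs <;> omega

lemma pv_foldl_guard {α β γ : Type} (l : List β) (p : β → Prop) [DecidablePred p]
    (e : β → γ) (f : α → γ → α) (a : α) :
    l.foldl (fun acc x => if p x then f acc (e x) else acc) a
      = (l.filterMap (fun x => if p x then some (e x) else none)).foldl f a := by
  induction l generalizing a with
  | nil => rfl
  | cons x xs ih =>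
    by_cases h : p x <;> simp [h, ih]

lemma pv_foldl_flatMap {α β γ : Type} (l : List β) (g : β → List γ) (f : α → γ → α) (a : α) :
    l.foldl (fun acc x => (g x).foldl f acc) a = (l.flatMap g).foldl f a := by
  induction l generalizing a with
  | nil => rfl
  | cons x xs ih => simp [List.flatMap_cons, List.foldl_append, ih]

-- both programs' nested scan is the fold of the per-cell step over the '@' cells in scan order
lemma pv_scan_eq_fold (content : List String)
    (f : ((List (Int × Int)) × Int) → (Int × Int) → ((List (Int × Int)) × Int)) :
    (PySem.List.pyRange 0 (content.length : Int) 1).foldl (fun acc i =>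
      (PySem.List.pyRange 0 (PySem.Str.len (PySem.List.pyGetD content i "")) 1).foldl (fun acc j =>
        if PySem.Str.pyGet? (PySem.List.pyGetD content i "") j = some '@' then
          f acc (i, j)
        else acc) acc) (([] : List (Int × Int)), (0 : Int))
    = (pvCells (pvG content)).foldl f (([] : List (Int × Int)), (0 : Int)) := by
  rw [PySem.List.pyRange_zero_natCast, List.foldl_map]
  unfold pvCells
  rw [← pv_foldl_flatMap]
  rw [show (pvG content).length = content.length by simp [pvG]]
  apply PySem.List.foldl_congr_mem
  intro acc i hi
  rw [List.mem_range] at hi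
  simp only [PySem.List.pyGetD_natCast]
  rw [show PySem.Str.len (content.getD i "")
      = (((content.getD i "").toList.length : Nat) : Int) by simp [PySem.Str.len_eq]]
  rw [PySem.List.pyRange_zero_natCast, List.foldl_map]
  rw [pv_foldl_guard (e := fun j : Nat => ((i : Int), (j : Int)))
    (p := fun j : Nat => PySem.Str.pyGet? (content.getD i "") ((j : Nat) : Int) = some '@')
    (f := f)]
  congr 1
  unfold pvCellsRow
  rw [show ((pvG content).getD i []).length = (content.getD i "").toList.length by
    rw [pvG, pv_g_getD]]
  apply List.filterMap_congr
  intro j hj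
  rw [List.mem_range] at hj
  rw [pvG, pv_g_getD]
  simp only [PySem.Str.pyGet?_natCast]
  simp only [List.getD_eq_getElem?_getD]
  cases h : (content[i]?.getD "").toList[j]? with
  | none => simp
  | some ch => simp

-- membership in the cell list, nat-indexed
lemma pv_mem_cells' (g : List (List Char)) (c : Int × Int) (hc : c ∈ pvCells g) :
    ∃ i j : Nat, i < g.length ∧ j < (g.getD i []).length ∧
      (g.getD i []).getD j ' ' = '@' ∧ c = ((i : Int), (j : Int)) := by
  unfold pvCells pvCellsRow at hc
  simp only [List.mem_flatMap, List.mem_range, List.mem_filterMap,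
    Option.ite_none_right_eq_some, Option.some.injEq] at hc
  obtain ⟨i, hi, j, hj, hch, rfl⟩ := hc
  exact ⟨i, j, hi, hj, hch, rfl⟩

-- pass-1 characterisation: the prefix list is the map of prefix '@'-counts
lemma pv_prefix_pair (row : List Char) :
    row.foldl (fun (p : List Int × Int) ch =>
      (p.1 ++ [if ch = '@' then p.2 + 1 else p.2], if ch = '@' then p.2 + 1 else p.2))
      ([0], 0)
    = ((List.range (row.length + 1)).map
        (fun c => (((row.take c).countP (fun ch => ch = '@') : Nat) : Int)),
       ((row.countP (fun ch => ch = '@') : Nat) : Int)) := by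
  induction row using List.reverseRecOn with
  | nil => rfl
  | append_singleton xs x ih =>
    rw [List.foldl_append, ih]
    simp only [List.foldl_cons, List.foldl_nil]
    refine Prod.ext ?_ ?_
    · show _ ++ [_] = _
      conv_rhs => rw [show (xs ++ [x]).length + 1 = (xs.length + 1) + 1 by simp,
        List.range_succ, List.map_append, List.map_cons, List.map_nil]
      congr 1
      · apply List.map_congr_left
        intro c hcm
        rw [List.mem_range] at hcm
        rw [List.take_append_of_le_length (by omega)]
      · rw [List.take_of_length_le (by simp), List.countP_append, List.countP_cons,
          List.countP_nil]
        by_cases hx : x = '@' <;> simp [hx]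
    · show (if x = '@' then _ else _) = _
      rw [List.countP_append, List.countP_cons, List.countP_nil]
      by_cases hx : x = '@' <;> simp [hx]

lemma pv_prefix_eval (row : List Char) :
    pvPrefixRow row = (List.range (row.length + 1)).map
      (fun c => (((row.take c).countP (fun ch => ch = '@') : Nat) : Int)) := by
  unfold pvPrefixRow
  rw [pv_prefix_pair]

-- counting one more cell of the prefix
lemma pv_cnt_take_succ (L : List Char) (c : Nat) (h : c < L.length) :
    (((L.take (c + 1)).countP (fun ch => ch = '@') : Nat) : Int)
      = (((L.take c).countP (fun ch => ch = '@') : Nat) : Int)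
        + (if L.getD c ' ' = '@' then 1 else 0) := by
  rw [List.take_add_one, List.getElem?_eq_getElem h, List.countP_append]
  rw [List.getD_eq_getElem?_getD, List.getElem?_eq_getElem h]
  by_cases hx : L[c] = '@' <;> simp [hx]

-- the prefix-difference over columns [max(j-1,0), min(j+2,W)) is the 3-offset count
lemma pv_window (L : List Char) (j W : Nat) (hjW : j < W)
    (hlen : min (j + 2) W ≤ L.length) :
    (((L.take (min (j + 2) W)).countP (fun ch => ch = '@') : Nat) : Int)
      - (((L.take (j - 1)).countP (fun ch => ch = '@') : Nat) : Int)
    = ((([-1, 0, 1] : List Int).countP fun z =>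
        decide (0 ≤ (j : Int) + z ∧ (j : Int) + z < (W : Int) ∧
          L.getD ((j : Int) + z).toNat ' ' = '@')) : Nat) := by
  have t1 : ((j : Int) + -1).toNat = j - 1 := by omega
  have t2 : ((j : Int) + 0).toNat = j := by omega
  have t3 : ((j : Int) + 1).toNat = j + 1 := by omega
  simp only [List.countP_cons, List.countP_nil, t1, t2, t3]
  by_cases h1 : 1 ≤ j <;> by_cases h2 : j + 1 < W
  · -- interior: window is [j-1, j+2)
    rw [show min (j + 2) W = j + 2 by omega]
    have e : j - 1 + 1 = j := by omega
    have s1 := pv_cnt_take_succ L (j - 1) (by omega)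
    rw [e] at s1
    have s2 := pv_cnt_take_succ L j (by omega)
    have s3 := pv_cnt_take_succ L (j + 1) (by omega)
    rw [show j + 2 = (j + 1) + 1 from rfl, s3, s2, s1]
    simp only [List.getD_eq_getElem?_getD]
    by_cases b1 : L[j - 1]?.getD ' ' = '@' <;>
      by_cases b2 : L[j]?.getD ' ' = '@' <;>
      by_cases b3 : L[j + 1]?.getD ' ' = '@' <;>
      simp [b1, b2, b3, h1, h2, hjW, show (0 : Int) ≤ (j : Int) + -1 by omega,
        show (j : Int) + -1 < (W : Int) by omega, show (j : Int) + 1 < (W : Int) by omega] <;>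
      omega
  · -- right edge, j ≥ 1: window is [j-1, j+1)
    rw [show min (j + 2) W = j + 1 by omega]
    have e : j - 1 + 1 = j := by omega
    have s1 := pv_cnt_take_succ L (j - 1) (by omega)
    rw [e] at s1
    have s2 := pv_cnt_take_succ L j (by omega)
    rw [s2, s1]
    simp only [List.getD_eq_getElem?_getD]
    by_cases b1 : L[j - 1]?.getD ' ' = '@' <;>
      by_cases b2 : L[j]?.getD ' ' = '@' <;>
      simp [b1, b2, h1, hjW, show (0 : Int) ≤ (j : Int) + -1 by omega,
        show (j : Int) + -1 < (W : Int) by omega, show ¬ ((j : Int) + 1 < (W : Int)) by omega] <;>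
      omega
  · -- left edge, j = 0, W ≥ 2: window is [0, 2)
    have hj0 : j = 0 := by omega
    subst hj0
    rw [show min (0 + 2) W = 2 by omega]
    have s2 := pv_cnt_take_succ L 0 (by omega)
    have s3 := pv_cnt_take_succ L 1 (by omega)
    rw [show (2 : Nat) = 1 + 1 from rfl, s3, s2]
    simp only [List.getD_eq_getElem?_getD]
    by_cases b2 : L[(0 : Nat)]?.getD ' ' = '@' <;>
      by_cases b3 : L[(1 : Nat)]?.getD ' ' = '@' <;>
      simp [b2, b3, hjW, show ((0 : Nat) : Int) + 1 < (W : Int) by omega] <;>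
      omega
  · -- single cell: j = 0, W = 1
    have hj0 : j = 0 := by omega
    subst hj0
    rw [show min (0 + 2) W = 1 by omega]
    have s2 := pv_cnt_take_succ L 0 (by omega)
    rw [show (1 : Nat) = 0 + 1 from rfl, s2]
    simp only [List.getD_eq_getElem?_getD]
    by_cases b2 : L[(0 : Nat)]?.getD ' ' = '@' <;>
      simp [b2, hjW, show ¬ (((0 : Nat) : Int) + 1 < (W : Int)) by omega] <;>
      omega

-- reading the prefix table of row r at an in-range Int column
lemma pv_P_lookup (content : List String) (r : Nat) (hr : r < content.length)
    (c : Int) (hc0 : 0 ≤ c) (hc1 : c ≤ (((pvG content).getD r []).length : Int)) :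
    PySem.List.pyGetD (PySem.List.pyGetD (pvP content) (r : Int) []) c 0
      = (((((pvG content).getD r []).take c.toNat).countP (fun ch => ch = '@') : Nat) : Int) := by
  rw [show PySem.List.pyGetD (pvP content) (r : Int) [] = (pvP content).getD r [] from by
    simp [PySem.List.pyGetD_natCast]]
  unfold pvP
  rw [List.getD_eq_getElem?_getD, List.getElem?_map]
  rw [List.getElem?_eq_getElem hr]
  simp only [Option.map_some, Option.getD_some]
  rw [pv_prefix_eval]
  rw [← Int.toNat_of_nonneg hc0]
  simp only [PySem.List.pyGetD_natCast]
  have hrow : content[r].toList = (pvG content).getD r [] := by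
    rw [pvG, pv_g_getD, List.getD_eq_getElem?_getD, List.getElem?_eq_getElem hr]
    rfl
  rw [hrow]
  have hlt : c.toNat < ((pvG content).getD r []).length + 1 := by omega
  rw [List.getD_eq_getElem?_getD, List.getElem?_map, List.getElem?_range hlt]
  rfl

-- the raw A-side condition, simplified at an in-range neighbour row under Pre_
lemma pv_araw_eq (content : List String) (hpre : pvPreP content)
    (i j : Nat) (hi : i < content.length) (hj : j < ((pvG content).getD i []).length)
    (hat : ((pvG content).getD i []).getD j ' ' = '@')
    (k : Int) (hk : k ∈ ([-1, 0, 1] : List Int))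
    (hr0 : 0 ≤ (i : Int) + k) (hr1 : (i : Int) + k < (content.length : Int)) :
    (([-1, 0, 1] : List Int).countP fun z =>
      decide (((i : Int) + k ≥ 0 ∧ (i : Int) + k < (content.length : Int) ∧ (j : Int) + z ≥ 0 ∧
        (j : Int) + z < PySem.Str.len (PySem.List.pyGetD content (i : Int) "")) ∧
        PySem.Str.pyGet? (PySem.List.pyGetD content ((i : Int) + k) "") ((j : Int) + z) = some '@'))
    = (([-1, 0, 1] : List Int).countP fun z =>
        decide (0 ≤ (j : Int) + z ∧ (j : Int) + z < (((pvG content).getD i []).length : Int) ∧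
          ((pvG content).getD ((i : Int) + k).toNat []).getD ((j : Int) + z).toNat ' ' = '@')) := by
  apply List.countP_congr
  intro z hz
  dsimp only
  simp only [decide_eq_true_eq]
  rw [pv_W_eq content (i : Int) (by positivity) (by exact_mod_cast hi)]
  simp only [Int.toNat_natCast]
  constructor
  · rintro ⟨⟨-, -, hz0, hzW⟩, hget⟩
    have := (pv_lookup_iff content ((i : Int) + k) ((j : Int) + z) hr0 hz0).mp hget
    exact ⟨hz0, hzW, this.2⟩
  · rintro ⟨hz0, hzW, hch⟩
    have hlenr : (j : Int) + z < (((pvG content).getD ((i : Int) + k).toNat []).length : Int) :=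
      hpre i hi j hj hat k hk z hz hr0 hr1 hz0 hzW
    exact ⟨⟨hr0, hr1, hz0, hzW⟩,
      (pv_lookup_iff content ((i : Int) + k) ((j : Int) + z) hr0 hz0).mpr ⟨hlenr, hch⟩⟩

-- B's per-row prefix difference equals A's per-row 3-offset count (in-range row, Pre_)
lemma pv_row_term_eq (content : List String) (hpre : pvPreP content)
    (i j : Nat) (hi : i < content.length) (hj : j < ((pvG content).getD i []).length)
    (hat : ((pvG content).getD i []).getD j ' ' = '@')
    (k : Int) (hk : k ∈ ([-1, 0, 1] : List Int))
    (hr0 : 0 ≤ (i : Int) + k) (hr1 : (i : Int) + k < (content.length : Int)) :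
    PySem.List.pyGetD (PySem.List.pyGetD (pvP content) ((i : Int) + k) [])
        (min ((j : Int) + 2) (PySem.Str.len (PySem.List.pyGetD content (i : Int) ""))) 0
      - PySem.List.pyGetD (PySem.List.pyGetD (pvP content) ((i : Int) + k) []) (max ((j : Int) - 1) 0) 0
    = ((([-1, 0, 1] : List Int).countP fun z =>
        decide (((i : Int) + k ≥ 0 ∧ (i : Int) + k < (content.length : Int) ∧ (j : Int) + z ≥ 0 ∧
          (j : Int) + z < PySem.Str.len (PySem.List.pyGetD content (i : Int) "")) ∧
          PySem.Str.pyGet? (PySem.List.pyGetD content ((i : Int) + k) "") ((j : Int) + z) = some '@')) : Nat) := by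
  set r : Nat := ((i : Int) + k).toNat with hrdef
  have hreq : ((r : Nat) : Int) = (i : Int) + k := Int.toNat_of_nonneg hr0
  have hrlt : r < content.length := by omega
  set L : List Char := (pvG content).getD r [] with hLdef
  set W : Nat := ((pvG content).getD i []).length with hWdef
  -- the clipped window's top stays inside row r (from Pre_ at the center cell)
  have hlen : min (j + 2) W ≤ L.length := by
    have hz : ∃ z ∈ ([-1, 0, 1] : List Int), (j : Int) + z = (min (j + 2) W : Nat) - 1 := by
      by_cases h2 : j + 2 ≤ W
      · exact ⟨1, by simp, by omega⟩
      · exact ⟨((W : Int) - 1) - (j : Int), by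
          have : ((W : Int) - 1) - (j : Int) = 0 ∨ ((W : Int) - 1) - (j : Int) = -1 ∨
              ((W : Int) - 1) - (j : Int) = 1 := by omega
          rcases this with h | h | h <;> simp [h], by omega⟩
    obtain ⟨z, hzm, hze⟩ := hz
    have := hpre i hi j hj hat k hk z hzm hr0 hr1 (by omega) (by rw [← hWdef]; omega)
    rw [← hrdef, ← hLdef, hze] at this
    omega
  have hWe : PySem.Str.len (PySem.List.pyGetD content (i : Int) "") = (W : Int) := by
    rw [pv_W_eq content (i : Int) (by positivity) (by exact_mod_cast hi)]
    simp [hWdef]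
  rw [hWe, ← hreq]
  have hminc : min ((j : Int) + 2) (W : Int) = ((min (j + 2) W : Nat) : Int) := by omega
  have hmaxc : max ((j : Int) - 1) 0 = ((j - 1 : Nat) : Int) := by omega
  rw [hminc, hmaxc]
  rw [pv_P_lookup content r hrlt _ (by omega) (by rw [← hLdef]; omega),
    pv_P_lookup content r hrlt _ (by omega) (by rw [← hLdef]; omega)]
  simp only [Int.toNat_natCast, ← hLdef]
  rw [pv_window L j W (by rw [hWdef] at *; omega) hlen]
  congr 1
  have ha := pv_araw_eq content hpre i j hi hj hat k hk hr0 hr1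
  simp only [hWe, ← hreq, Int.toNat_natCast, ← hLdef] at ha
  exact ha.symm

-- A's neighbour total equals B's prefix-sum total at every '@' cell
lemma pv_tn_eq_total (content : List String) (hpre : pvPreP content)
    (i j : Nat) (hi : i < content.length) (hj : j < ((pvG content).getD i []).length)
    (hat : ((pvG content).getD i []).getD j ' ' = '@') :
    pvTn_A content (content.length : Int) (i : Int) (j : Int)
      = pvTotal_B content (i : Int) (j : Int) := by
  rw [pv_tn_eval]
  unfold pvTotal_B
  by_cases e1 : 1 ≤ i <;> by_cases e2 : (i : Int) + 1 < (content.length : Int)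
  · -- interior rows: range is [i-1, i, i+1]
    rw [show max ((i : Int) - 1) 0 = (i : Int) + -1 by omega,
      show min ((i : Int) + 2) (content.length : Int) = (i : Int) + 2 by omega]
    rw [PySem.List.pyRange_one_cons (by omega),
      show (i : Int) + -1 + 1 = (i : Int) + 0 by ring,
      PySem.List.pyRange_one_cons (by omega),
      show (i : Int) + 0 + 1 = (i : Int) + 1 by ring,
      PySem.List.pyRange_one_cons (by omega),
      PySem.List.pyRange_one_eq_nil (by omega)]
    simp only [List.foldl_cons, List.foldl_nil]
    rw [if_neg (by omega), if_neg (by omega), if_neg (by omega)]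
    rw [pv_row_term_eq content hpre i j hi hj hat (-1) (by decide) (by omega) (by omega),
      pv_row_term_eq content hpre i j hi hj hat 0 (by decide) (by omega) (by omega),
      pv_row_term_eq content hpre i j hi hj hat 1 (by decide) (by omega) (by omega)]
    ring
  · -- last row, i ≥ 1: range is [i-1, i]
    rw [show max ((i : Int) - 1) 0 = (i : Int) + -1 by omega,
      show min ((i : Int) + 2) (content.length : Int) = (i : Int) + 1 by omega]
    rw [PySem.List.pyRange_one_cons (by omega),
      show (i : Int) + -1 + 1 = (i : Int) + 0 by ring,
      PySem.List.pyRange_one_cons (by omega),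
      PySem.List.pyRange_one_eq_nil (by omega)]
    simp only [List.foldl_cons, List.foldl_nil]
    rw [if_neg (by omega), if_neg (by omega), if_pos (by omega)]
    rw [pv_row_term_eq content hpre i j hi hj hat (-1) (by decide) (by omega) (by omega),
      pv_row_term_eq content hpre i j hi hj hat 0 (by decide) (by omega) (by omega)]
    ring
  · -- first row, more below: range is [i, i+1]
    rw [show max ((i : Int) - 1) 0 = (i : Int) + 0 by omega,
      show min ((i : Int) + 2) (content.length : Int) = (i : Int) + 2 by omega]
    rw [PySem.List.pyRange_one_cons (by omega),
      show (i : Int) + 0 + 1 = (i : Int) + 1 by ring,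
      PySem.List.pyRange_one_cons (by omega),
      PySem.List.pyRange_one_eq_nil (by omega)]
    simp only [List.foldl_cons, List.foldl_nil]
    rw [if_pos (by omega), if_neg (by omega), if_neg (by omega)]
    rw [pv_row_term_eq content hpre i j hi hj hat 0 (by decide) (by omega) (by omega),
      pv_row_term_eq content hpre i j hi hj hat 1 (by decide) (by omega) (by omega)]
  · -- single row: range is [i]
    rw [show max ((i : Int) - 1) 0 = (i : Int) + 0 by omega,
      show min ((i : Int) + 2) (content.length : Int) = (i : Int) + 1 by omega]
    rw [PySem.List.pyRange_one_cons (by omega),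
      show (i : Int) + 0 + 1 = (i : Int) + 1 by ring,
      PySem.List.pyRange_one_eq_nil (by omega)]
    simp only [List.foldl_cons, List.foldl_nil]
    rw [if_pos (by omega), if_neg (by omega), if_pos (by omega)]
    rw [pv_row_term_eq content hpre i j hi hj hat 0 (by decide) (by omega) (by omega)]
    ring

-- ===== VERDICT (by name: the statement is the Claim_ definition above) =====
theorem get_positions_and_sum_spec : Claim_equal_get_positions_and_sum := by
  intro content _ hpre
  unfold Spec_get_positions_and_sum
  unfold get_positions_and_sum get_positions_and_sum_alt
  dsimp only
  refine Eq.trans (pv_scan_eq_fold content (fun acc c =>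
      if pvTn_A content (content.length : Int) c.1 c.2 ≤ 4 ∧
          pvTn_A content (content.length : Int) c.1 c.2 > 0 then
        (PySem.Set.add acc.1 c, acc.2 + 1) else acc))
    (Eq.trans ?_ (pv_scan_eq_fold content (fun acc c =>
      if 1 ≤ pvTotal_B content c.1 c.2 ∧ pvTotal_B content c.1 c.2 ≤ 4 then
        (PySem.Set.add acc.1 c, acc.2 + 1) else acc)).symm)
  apply PySem.List.foldl_congr_mem
  intro acc c hc
  obtain ⟨i, j, hi, hj, hat, rfl⟩ := pv_mem_cells' (pvG content) c hc
  have hi' : i < content.length := by simpa [pvG] using hi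
  show (if pvTn_A content (content.length : Int) (i : Int) (j : Int) ≤ 4 ∧
      pvTn_A content (content.length : Int) (i : Int) (j : Int) > 0 then _ else acc) = _
  rw [pv_tn_eq_total content ((pv_pre_iff content).mp hpre) i j hi' hj hat]
  dsimp only
  split_ifs with h1 h2 <;> first | rfl | omega
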